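-- pv_equiv track=rewrite | github.com/wushiwang/LeetCode-Python | 483.smallest-good-base.python3.py | check
-- ===== SOURCE A (Python) =====
-- def check(n, x, m):
--     p, cur = 1, 1
--     for i in range(m-1):
--         p *= x
--         cur += p
--     if cur < n:
--         return -1
--     elif cur > n:
--         return 1
--     else:
--         return 0
-- ===== SOURCE B (Python) =====
-- def check(n, x, m):
--     if m <= 1:
--         s = 1
--     elif x == 1:
--         s = m
--     else:
--         s = (x ** m - 1) // (x - 1)
--     if s < n:
--         return -1
--     if s > n:
--         return 1
--     return 0
-- ===== Notes on version B (the rewrite author's own statement) =====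
-- stated objective: faster
-- what changed: Replaces the O(m)-step accumulation loop for the geometric sum 1+x+...+x^(m-1) by the closed form (x**m-1)//(x-1) computed with Python's built-in square-and-multiply exponentiation (special cases m<=1 and x==1 handled directly).
import Mathlib
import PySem

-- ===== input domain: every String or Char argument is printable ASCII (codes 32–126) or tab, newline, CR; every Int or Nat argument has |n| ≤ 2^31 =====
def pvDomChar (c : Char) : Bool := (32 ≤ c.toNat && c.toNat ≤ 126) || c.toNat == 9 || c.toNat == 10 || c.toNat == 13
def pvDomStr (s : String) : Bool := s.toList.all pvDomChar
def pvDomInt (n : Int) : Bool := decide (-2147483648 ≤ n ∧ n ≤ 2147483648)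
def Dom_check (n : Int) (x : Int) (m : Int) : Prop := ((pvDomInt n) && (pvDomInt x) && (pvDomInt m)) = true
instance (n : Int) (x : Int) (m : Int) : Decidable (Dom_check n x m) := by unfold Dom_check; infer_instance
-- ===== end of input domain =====

-- B replaces A's O(m) accumulation loop by the closed form (x^m-1)//(x-1) (with m<=1 and x=1 handled directly); objective: faster.


-- ===== PORT A =====
def check (n : Int) (x : Int) (m : Int) : Int :=
  let st := (PySem.List.pyRange 0 (m - 1) 1).foldl
    (fun (s : Int × Int) _ => (s.1 * x, s.2 + s.1 * x)) (1, 1)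
  if st.2 < n then -1 else if st.2 > n then 1 else 0

-- ===== PORT B =====
def check_alt (n : Int) (x : Int) (m : Int) : Int :=
  let s : Int :=
    if m ≤ 1 then 1
    else if x = 1 then m
    else PySem.Int.floordiv (x ^ m.toNat - 1) (x - 1)
  if s < n then -1 else if s > n then 1 else 0

-- ===== PRECONDITION & SPEC =====
def Spec_check (n : Int) (x : Int) (m : Int) (out : Int) : Prop := out = check_alt n x m
instance (n : Int) (x : Int) (m : Int) (out : Int) : Decidable (Spec_check n x m out) := by unfold Spec_check; infer_instance

-- ===== CLAIM (what is proved, stated in full; the proofs are below) =====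
def Claim_equal_check : Prop := ∀ (n : Int) (x : Int) (m : Int), Dom_check n x m → Spec_check n x m (check n x m)

-- ===== LEMMAS AND PROOFS =====

-- the loop invariant: after consuming a list of length k starting from (x^j, ∑_{i≤j} x^i),
-- the state is (x^(j+k), ∑_{i≤j+k} x^i)
theorem check_loop_eq (x : Int) (l : List Int) : ∀ (j : Nat),
    l.foldl (fun (s : Int × Int) _ => (s.1 * x, s.2 + s.1 * x))
      (x ^ j, ∑ i ∈ Finset.range (j + 1), x ^ i)
    = (x ^ (j + l.length), ∑ i ∈ Finset.range (j + l.length + 1), x ^ i) := by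
  induction l with
  | nil => intro j; simp
  | cons a l ih =>
    intro j
    have h1 : x ^ j * x = x ^ (j + 1) := by ring
    have h2 : (∑ i ∈ Finset.range (j + 1), x ^ i) + x ^ j * x
        = ∑ i ∈ Finset.range (j + 1 + 1), x ^ i := by
      rw [Finset.sum_range_succ (n := j + 1)]; ring
    rw [List.foldl_cons]
    show l.foldl _ (x ^ j * x, (∑ i ∈ Finset.range (j + 1), x ^ i) + x ^ j * x) = _
    rw [h2, h1, ih (j + 1)]
    have e : j + 1 + l.length = j + (a :: l).length := by simp [List.length_cons]; omega
    rw [e]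

-- the loop's final accumulator equals ∑_{i < (m-1).toNat + 1} x^i
theorem check_cur_eq (x m : Int) :
    ((PySem.List.pyRange 0 (m - 1) 1).foldl
      (fun (s : Int × Int) _ => (s.1 * x, s.2 + s.1 * x)) (1, 1)).2
    = ∑ i ∈ Finset.range ((m - 1).toNat + 1), x ^ i := by
  have h0 : ((1 : Int), (1 : Int)) = (x ^ 0, ∑ i ∈ Finset.range (0 + 1), x ^ i) := by simp
  rw [h0, check_loop_eq x _ 0]
  simp [PySem.List.length_pyRange_one]

theorem check_sum_eq_closed (x m : Int) (hm : ¬ m ≤ 1) (hx : ¬ x = 1) :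
    (∑ i ∈ Finset.range ((m - 1).toNat + 1), x ^ i)
      = PySem.Int.floordiv (x ^ m.toNat - 1) (x - 1) := by
  have hk : (m - 1).toNat + 1 = m.toNat := by omega
  have hgeom := geom_sum_mul x ((m - 1).toNat + 1)
  rw [hk] at hgeom ⊢
  have hb : x - 1 ≠ 0 := by intro h; apply hx; omega
  rw [← hgeom]
  simp [PySem.Int.floordiv, Int.mul_fdiv_cancel _ hb]

-- ===== VERDICT (by name: the statement is the Claim_ definition above) =====
theorem check_spec : Claim_equal_check := by
  unfold Claim_equal_check
  intro n x m _
  unfold Spec_check check check_alt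
  simp only [check_cur_eq]
  by_cases hm : m ≤ 1
  · have : (m - 1).toNat = 0 := by omega
    simp [this, hm]
  · by_cases hx : x = 1
    · have hs : (∑ i ∈ Finset.range ((m - 1).toNat + 1), x ^ i) = m := by
        rw [hx]; simp; omega
      rw [hs]; simp [hm, hx]
    · simp only [check_sum_eq_closed x m hm hx, if_neg hm, if_neg hx]
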